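-- pv_equiv track=rewrite | github.com/hellboyinside/Exam_Bilet11_Python_Excel | main.py | find_max_adjacent_rows
-- ===== SOURCE A (Python) =====
-- from typing import List, Tuple
--
-- def row_sum(row: List[int]) -> int:
--     """Повертає суму елементів рядка."""
--     return sum(row)
--
-- def find_max_adjacent_rows(matrix: List[List[int]]) -> Tuple[int, int, int]:
--     """
--     Знаходить два сусідні рядки з максимальною сумою елементів.
--     Повертає: (idx1, idx2, max_sum) де idx1/idx2 — індекси (0-based).
--     """
--     if len(matrix) < 2:
--         raise ValueError("Масив має містити щонайменше 2 рядки.")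
--     if any(len(r) != 2 for r in matrix):
--         raise ValueError("Кожен рядок має містити рівно 2 елементи (2 стовпці).")
--
--
--
--     max_sum = row_sum(matrix[0]) + row_sum(matrix[1])
--     idx1 = 0
--
--
--     for i in range(1, len(matrix) - 1):
--         s = row_sum(matrix[i]) + row_sum(matrix[i + 1])
--         if s > max_sum:
--             max_sum = s
--             idx1 = i
--
--     return idx1, idx1 + 1, max_sum
-- ===== SOURCE B (Python) =====
-- from typing import List, Tuple
--
-- def find_max_adjacent_rows(matrix: List[List[int]]) -> Tuple[int, int, int]:
--     if len(matrix) < 2: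
--         raise ValueError("Масив має містити щонайменше 2 рядки.")
--     if any(len(r) != 2 for r in matrix):
--         raise ValueError("Кожен рядок має містити рівно 2 елементи (2 стовпці).")
--     # pair sums of adjacent rows, built once via zip
--     ps = [sum(a) + sum(b) for a, b in zip(matrix, matrix[1:])]
--
--     def best(lo: int, hi: int) -> int:
--         # first index of the maximum of ps[lo:hi] (hi - lo >= 1), by divide & conquer
--         if hi - lo == 1:
--             return lo
--         mid = (lo + hi) // 2
--         l = best(lo, mid)
--         r = best(mid, hi)
--         return l if ps[l] >= ps[r] else r
--
--     i = best(0, len(ps))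
--     return i, i + 1, ps[i]
-- ===== Notes on version B (the rewrite author's own statement) =====
-- stated objective: alternative
-- what changed: B builds the adjacent pair-sum table once via zip and then finds the first maximal index by divide-and-conquer recursion over index ranges (ties resolved leftward with >=), instead of A's single left-to-right pass carrying an (idx, max_sum) accumulator and re-summing each row twice.
import Mathlib
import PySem

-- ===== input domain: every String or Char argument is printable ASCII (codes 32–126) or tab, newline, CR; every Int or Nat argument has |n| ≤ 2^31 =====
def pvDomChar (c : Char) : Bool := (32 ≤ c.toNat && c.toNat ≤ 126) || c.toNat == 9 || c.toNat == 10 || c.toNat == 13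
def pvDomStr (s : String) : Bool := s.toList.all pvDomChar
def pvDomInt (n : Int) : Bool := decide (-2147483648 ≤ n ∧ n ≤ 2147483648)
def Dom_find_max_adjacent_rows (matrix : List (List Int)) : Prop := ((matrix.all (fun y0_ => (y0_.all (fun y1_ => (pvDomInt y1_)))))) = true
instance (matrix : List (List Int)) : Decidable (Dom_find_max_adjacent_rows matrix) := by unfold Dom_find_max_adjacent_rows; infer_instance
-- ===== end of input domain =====

-- B builds the adjacent pair-sum table once (via zip) and finds the first maximal index
-- by divide-and-conquer recursion over index ranges instead of A's accumulator pass.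

-- ===== PORT A =====
def pvRowSum (row : List Int) : Int := row.sum

def find_max_adjacent_rows (matrix : List (List Int)) : Int × Int × Int :=
  if matrix.length < 2 then (0, 0, 0)        -- Python raises ValueError here (outside Pre_)
  else if matrix.any (fun r => r.length ≠ 2) then (0, 0, 0)  -- ValueError (outside Pre_)
  else
    let init := pvRowSum (PySem.List.pyGetD matrix 0 []) + pvRowSum (PySem.List.pyGetD matrix 1 [])
    let st := (PySem.List.pyRange 1 ((matrix.length : Int) - 1) 1).foldl
      (fun (st : Int × Int) i =>
        let s := pvRowSum (PySem.List.pyGetD matrix i []) + pvRowSum (PySem.List.pyGetD matrix (i+1) [])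
        if s > st.2 then (i, s) else st) (0, init)
    (st.1, st.1 + 1, st.2)

-- ===== PORT B =====
-- best(lo, hi): first index of the maximum of ps[lo:hi] by divide and conquer.
-- Python's guard is 'hi - lo == 1' (callers keep lo < hi); '≤ 1' makes the same
-- computation total in Lean (on lo < hi it is the identical test).
def pvBestFuel (ps : List Int) : Nat → Int → Int → Int
  | 0, lo, _hi => lo   -- fuel exhausted; unreachable, the callers pass fuel ≥ hi - lo
  | fuel+1, lo, hi =>
    if hi - lo ≤ 1 then lo
    else
      let mid := PySem.Int.floordiv (lo + hi) 2
      let l := pvBestFuel ps fuel lo mid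
      let r := pvBestFuel ps fuel mid hi
      if PySem.List.pyGetD ps l 0 ≥ PySem.List.pyGetD ps r 0 then l else r

def pvBest (ps : List Int) (lo hi : Int) : Int := pvBestFuel ps (hi - lo).toNat lo hi

def find_max_adjacent_rows_alt (matrix : List (List Int)) : Int × Int × Int :=
  if matrix.length < 2 then (0, 0, 0)        -- Python raises ValueError here (outside Pre_)
  else if matrix.any (fun r => r.length ≠ 2) then (0, 0, 0)  -- ValueError (outside Pre_)
  else
    let ps := (matrix.zip matrix.tail).map (fun p => p.1.sum + p.2.sum)
    let i := pvBest ps 0 (ps.length : Int)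
    (i, i + 1, PySem.List.pyGetD ps i 0)

-- ===== PRECONDITION & SPEC =====
-- A raises ValueError on fewer than 2 rows or on a row not of length 2; Pre_ excludes exactly those.
def Pre_find_max_adjacent_rows (matrix : List (List Int)) : Prop :=
  2 ≤ matrix.length ∧ ∀ r ∈ matrix, r.length = 2
instance (matrix : List (List Int)) : Decidable (Pre_find_max_adjacent_rows matrix) := by
  unfold Pre_find_max_adjacent_rows; infer_instance
def pvWitness_find_max_adjacent_rows : List (List Int) := [[1, 2], [3, 4], [0, 0]]

def Spec_find_max_adjacent_rows (matrix : List (List Int)) (out : Int × Int × Int) : Prop := out = find_max_adjacent_rows_alt matrix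
instance (matrix : List (List Int)) (out : Int × Int × Int) : Decidable (Spec_find_max_adjacent_rows matrix out) := by unfold Spec_find_max_adjacent_rows; infer_instance

-- ===== CLAIM (what is proved, stated in full; the proofs are below) =====
def Claim_equal_find_max_adjacent_rows : Prop := ∀ (matrix : List (List Int)), Dom_find_max_adjacent_rows matrix → Pre_find_max_adjacent_rows matrix → Spec_find_max_adjacent_rows matrix (find_max_adjacent_rows matrix)

-- ===== LEMMAS AND PROOFS =====

-- First-argmax-with-seed fold, abstract over the key function.
def pvG (k : Int → Int) (j : Int) (l : List Int) : Int :=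
  l.foldl (fun b i => if k i > k b then i else b) j

theorem pvG_mem (k : Int → Int) : ∀ (l : List Int) (j : Int), pvG k j l ∈ j :: l := by
  intro l
  induction l with
  | nil => intro j; simp [pvG]
  | cons a t ih =>
    intro j
    simp only [pvG, List.foldl]
    by_cases hc : k a > k j
    · rw [if_pos hc]
      have := ih a
      simp only [List.mem_cons] at this ⊢; tauto
    · rw [if_neg hc]
      have := ih j
      simp only [List.mem_cons] at this ⊢; tauto

theorem pvG_congr (kA kB : Int → Int) :
    ∀ (l : List Int) (j : Int), (∀ x ∈ j :: l, kA x = kB x) → pvG kA j l = pvG kB j l := by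
  intro l
  induction l with
  | nil => intro j _; simp [pvG]
  | cons a t ih =>
    intro j h
    have hj : kA j = kB j := h j (by simp)
    have ha : kA a = kB a := h a (by simp)
    simp only [pvG, List.foldl]
    by_cases hc : kA a > kA j
    · rw [if_pos hc, if_pos (by rw [← ha, ← hj]; exact hc)]
      exact ih a (fun x hx => h x (by simp only [List.mem_cons] at hx ⊢; tauto))
    · rw [if_neg hc, if_neg (by rw [← ha, ← hj]; exact hc)]
      exact ih j (fun x hx => h x (by simp only [List.mem_cons] at hx ⊢; tauto))

-- seed-vs-inner: folding from seed j over a::l picks the inner argmax only if it strictly beats j.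
theorem pvG_cons (k : Int → Int) :
    ∀ (l : List Int) (a j : Int), pvG k j (a :: l) = if k (pvG k a l) > k j then pvG k a l else j := by
  intro l
  induction l with
  | nil => intro a j; simp [pvG, List.foldl]
  | cons b t ih =>
    intro a j
    have hj : pvG k j (a :: b :: t) = pvG k (if k a > k j then a else j) (b :: t) := by
      simp [pvG, List.foldl]
    rw [hj]
    by_cases hc : k a > k j
    · rw [if_pos hc, ih b a]
      split_ifs <;> first | rfl | omega
    · rw [if_neg hc, ih b j, ih b a]
      split_ifs <;> first | rfl | omega

-- A's fold carries (index, its key); with the key of its index as invariant it is pvG.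
theorem pv_fold_pair (k : Int → Int) :
    ∀ (l : List Int) (j : Int),
    l.foldl (fun (st : Int × Int) i =>
        let s := k i
        if s > st.2 then (i, s) else st) (j, k j)
    = (pvG k j l, k (pvG k j l)) := by
  intro l
  induction l with
  | nil => intro j; simp [pvG, List.foldl]
  | cons a t ih =>
    intro j
    simp only [List.foldl, pvG]
    by_cases hc : k a > k j
    · rw [if_pos hc, if_pos hc]; exact ih a
    · rw [if_neg hc, if_neg hc]; exact ih j

-- the divide-and-conquer search equals the left-to-right first-argmax over the same range
theorem pvBestFuel_eq (ps : List Int) :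
    ∀ (fuel : Nat) (lo hi : Int), lo < hi → (hi - lo).toNat ≤ fuel →
      pvBestFuel ps fuel lo hi = pvG (fun i => PySem.List.pyGetD ps i 0) lo (PySem.List.pyRange (lo+1) hi 1) := by
  intro fuel
  induction fuel with
  | zero => intro lo hi hlt hf; omega
  | succ fuel ih =>
    intro lo hi hlt hf
    rw [pvBestFuel]
    by_cases h1 : hi - lo ≤ 1
    · rw [if_pos h1]
      have hnil : PySem.List.pyRange (lo+1) hi 1 = [] :=
        PySem.List.pyRange_one_eq_nil (by omega)
      simp [hnil, pvG]
    · rw [if_neg h1]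
      have hm := PySem.Int.floordiv_mul_add_mod (lo + hi) 2
      have h2 := PySem.Int.mod_two_eq (lo + hi)
      set mid := PySem.Int.floordiv (lo + hi) 2 with hmid
      have hb : lo < mid ∧ mid < hi := by omega
      have hL := ih lo mid hb.1 (by omega)
      have hR := ih mid hi hb.2 (by omega)
      simp only
      rw [hL, hR]
      rw [PySem.List.pyRange_one_append (lo+1) mid hi (by omega) (by omega)]
      set k := fun i => PySem.List.pyGetD ps i 0 with hk
      have happ : pvG k lo (PySem.List.pyRange (lo+1) mid 1 ++ PySem.List.pyRange mid hi 1)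
          = pvG k (pvG k lo (PySem.List.pyRange (lo+1) mid 1)) (PySem.List.pyRange mid hi 1) := by
        simp [pvG, List.foldl_append]
      rw [happ]
      rw [PySem.List.pyRange_one_cons hb.2]
      set L := pvG k lo (PySem.List.pyRange (lo+1) mid 1)
      set R := pvG k mid (PySem.List.pyRange (mid+1) hi 1)
      rw [pvG_cons k _ mid L]
      show (if k L ≥ k R then L else R) = if k R > k L then R else L
      split_ifs with hA hB <;> first | rfl | omega

theorem pvBest_eq (ps : List Int) (lo hi : Int) (hlt : lo < hi) :
    pvBest ps lo hi = pvG (fun i => PySem.List.pyGetD ps i 0) lo (PySem.List.pyRange (lo+1) hi 1) :=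
  pvBestFuel_eq ps (hi - lo).toNat lo hi hlt le_rfl

-- the two keys agree on all indices 0 ≤ x < len(matrix) - 1
theorem pv_key_eq (matrix : List (List Int)) (x : Int)
    (h0 : 0 ≤ x) (h1 : x < (matrix.length : Int) - 1) :
    pvRowSum (PySem.List.pyGetD matrix x []) + pvRowSum (PySem.List.pyGetD matrix (x+1) [])
    = PySem.List.pyGetD ((matrix.zip matrix.tail).map (fun p => p.1.sum + p.2.sum)) x 0 := by
  have hlen : ((matrix.zip matrix.tail).map (fun (p : List Int × List Int) => p.1.sum + p.2.sum)).length = matrix.length - 1 := by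
    simp [List.length_zip, List.length_tail]
  rw [PySem.List.pyGetD_eq_getElem matrix (i := x) [] h0 (by omega),
      PySem.List.pyGetD_eq_getElem matrix (i := x+1) [] (by omega) (by omega),
      PySem.List.pyGetD_eq_getElem _ (i := x) 0 h0 (by rw [hlen]; omega)]
  have hxt : (x + 1).toNat = x.toNat + 1 := by omega
  simp [pvRowSum, hxt, List.getElem_zip, List.getElem_tail]

-- ===== VERDICT (by name: the statement is the Claim_ definition above) =====
theorem find_max_adjacent_rows_spec : Claim_equal_find_max_adjacent_rows := by
  intro matrix _ hpre
  obtain ⟨hlen, hrows⟩ := hpre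
  unfold Spec_find_max_adjacent_rows find_max_adjacent_rows find_max_adjacent_rows_alt
  have h1 : ¬ matrix.length < 2 := by omega
  have h2 : matrix.any (fun r => r.length ≠ 2) = false := by
    simp only [List.any_eq_false, decide_eq_true_eq]
    intro r hr
    simp [hrows r hr]
  rw [if_neg h1, if_neg h1, h2]
  simp only [Bool.false_eq_true, if_false]
  have hA := pv_fold_pair
    (fun i => pvRowSum (PySem.List.pyGetD matrix i []) + pvRowSum (PySem.List.pyGetD matrix (i+1) []))
    (PySem.List.pyRange 1 ((matrix.length : Int) - 1) 1) 0
  simp only [zero_add] at hA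
  rw [hA]
  have hpslen : (((matrix.zip matrix.tail).map (fun (p : List Int × List Int) => p.1.sum + p.2.sum)).length : Int)
      = (matrix.length : Int) - 1 := by
    simp [List.length_zip, List.length_tail]; omega
  rw [hpslen]
  have hB := pvBest_eq ((matrix.zip matrix.tail).map (fun p => p.1.sum + p.2.sum))
    0 ((matrix.length : Int) - 1) (by omega)
  simp only [zero_add] at hB
  rw [hB]
  have hcong : pvG (fun i => pvRowSum (PySem.List.pyGetD matrix i []) + pvRowSum (PySem.List.pyGetD matrix (i+1) []))
        0 (PySem.List.pyRange 1 ((matrix.length : Int) - 1) 1)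
      = pvG (fun i => PySem.List.pyGetD ((matrix.zip matrix.tail).map (fun p => p.1.sum + p.2.sum)) i 0)
        0 (PySem.List.pyRange 1 ((matrix.length : Int) - 1) 1) := by
    apply pvG_congr
    intro x hx
    simp only [List.mem_cons, PySem.List.mem_pyRange_one] at hx
    exact pv_key_eq matrix x (by omega) (by omega)
  rw [hcong]
  have hFmem := pvG_mem (fun i => PySem.List.pyGetD ((matrix.zip matrix.tail).map (fun p => p.1.sum + p.2.sum)) i 0)
    (PySem.List.pyRange 1 ((matrix.length : Int) - 1) 1) 0
  simp only [List.mem_cons, PySem.List.mem_pyRange_one] at hFmem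
  have hkey := pv_key_eq matrix
    (pvG (fun i => PySem.List.pyGetD ((matrix.zip matrix.tail).map (fun p => p.1.sum + p.2.sum)) i 0)
      0 (PySem.List.pyRange 1 ((matrix.length : Int) - 1) 1))
    (by omega) (by omega)
  rw [hkey]
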